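-- pv_equiv track=rewrite | github.com/tenghaohuang/AFFGEN | utils.py | check_puncts
-- ===== SOURCE A (Python) =====
-- puncts = [".", "!", "?"]
--
-- def check_puncts(txt):
--     cnt = 0
--     clean = ""
--     for s in txt:
--         if s in puncts:
--             cnt += 1
--         else:
--             clean += s
--     return cnt, clean
-- ===== SOURCE B (Python) =====
-- puncts = [".", "!", "?"]
--
-- def check_puncts(txt):
--     cnt = txt.count(".") + txt.count("!") + txt.count("?")
--     clean = txt.replace(".", "").replace("!", "").replace("?", "")
--     return cnt, clean
-- ===== Notes on version B (the rewrite author's own statement) =====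
-- stated objective: faster
-- what changed: B has no per-character Python loop: it counts each of the three punctuation marks with str.count and strips them with three chained str.replace passes (count and clean each recovered whole-string, per mark), instead of A's character-by-character loop with a counter and quadratic-prone string concatenation.
import Mathlib
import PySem

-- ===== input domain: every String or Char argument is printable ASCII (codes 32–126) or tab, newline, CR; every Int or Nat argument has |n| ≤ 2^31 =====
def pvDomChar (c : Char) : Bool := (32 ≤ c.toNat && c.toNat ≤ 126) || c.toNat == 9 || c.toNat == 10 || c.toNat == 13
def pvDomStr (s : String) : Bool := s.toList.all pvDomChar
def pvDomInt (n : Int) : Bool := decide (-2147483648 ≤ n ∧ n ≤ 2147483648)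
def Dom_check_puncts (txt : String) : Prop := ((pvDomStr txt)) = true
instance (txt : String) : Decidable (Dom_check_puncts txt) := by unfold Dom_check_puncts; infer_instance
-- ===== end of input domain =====

-- B drops A's per-character loop entirely: it counts each punctuation mark with
-- str.count and strips them with chained str.replace passes; objective: faster
-- (constant factor: C-level string primitives instead of a Python char loop; measured).

-- ===== PORT A =====
def pvPuncts : List Char := ['.', '!', '?']

-- literal port of A's loop: state (cnt, clean), clean kept as List Char (clean += s)
def check_puncts (txt : String) : Int × String :=
  let r := txt.toList.foldl
    (fun (st : Int × List Char) s =>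
      if pvPuncts.contains s then (st.1 + 1, st.2) else (st.1, st.2 ++ [s]))
    ((0 : Int), ([] : List Char))
  (r.1, String.ofList r.2)

-- ===== PORT B =====
def check_puncts_alt (txt : String) : Int × String :=
  let cnt : Int := (PySem.Str.count txt "." : Int) + (PySem.Str.count txt "!" : Int)
    + (PySem.Str.count txt "?" : Int)
  let clean := PySem.Str.replace (PySem.Str.replace (PySem.Str.replace txt "." "") "!" "") "?" ""
  (cnt, clean)

-- ===== PRECONDITION & SPEC =====
def Spec_check_puncts (txt : String) (out : Int × String) : Prop := out = check_puncts_alt txt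
instance (txt : String) (out : Int × String) : Decidable (Spec_check_puncts txt out) := by unfold Spec_check_puncts; infer_instance

-- ===== CLAIM (what is proved, stated in full; the proofs are below) =====
def Claim_equal_check_puncts : Prop := ∀ (txt : String), Dom_check_puncts txt → Spec_check_puncts txt (check_puncts txt)

-- ===== LEMMAS AND PROOFS =====

-- A's loop computes (count of punctuation chars, the non-punctuation chars in order)
theorem check_puncts_loop (l : List Char) (c : Int) (acc : List Char) :
    l.foldl (fun (st : Int × List Char) s =>
        if pvPuncts.contains s then (st.1 + 1, st.2) else (st.1, st.2 ++ [s]))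
      (c, acc)
    = (c + (l.countP (fun s => pvPuncts.contains s) : Int),
       acc ++ l.filter (fun s => !pvPuncts.contains s)) := by
  induction l generalizing c acc with
  | nil => simp
  | cons x xs ih =>
    rw [List.foldl_cons]
    by_cases h : pvPuncts.contains x
    · rw [if_pos h, ih]
      have hx : x ∈ pvPuncts := by simpa using h
      simp [hx]
      ring
    · rw [if_neg h, ih]
      have hx : x ∉ pvPuncts := by simpa using h
      simp [hx]

-- Chars.count.go with a single-char needle is List.count
theorem count_go_single (p : Char) (l : List Char) (fuel acc : Nat)
    (h : l.length ≤ fuel) :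
    PySem.Chars.count.go [p] fuel l acc = acc + l.count p := by
  induction l generalizing fuel acc with
  | nil => cases fuel <;> simp [PySem.Chars.count.go]
  | cons x xs ih =>
    cases fuel with
    | zero => simp at h
    | succ n =>
      simp only [PySem.Chars.count.go]
      by_cases hx : x = p
      · rw [if_pos (by simp [hx, List.isPrefixOf])]
        simp only [List.length_cons] at h
        rw [show ([p] : List Char).length = 1 from rfl]
        simp only [List.drop_succ_cons, List.drop_zero]
        rw [ih n (acc + 1) (by omega)]
        simp [hx]
        omega
      · rw [if_neg (by simp [List.isPrefixOf]; exact fun hh => hx hh.symm)]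
        simp only [List.length_cons] at h
        rw [ih n acc (by omega)]
        simp [hx]

-- Chars.replace.go deleting a single char is List.filter
theorem replace_go_single (p : Char) (l acc : List Char) (fuel : Nat)
    (h : l.length ≤ fuel) :
    PySem.Chars.replace.go [p] [] fuel l acc
      = acc.reverse ++ l.filter (fun c => c != p) := by
  induction l generalizing fuel acc with
  | nil => cases fuel <;> simp [PySem.Chars.replace.go]
  | cons x xs ih =>
    cases fuel with
    | zero => simp at h
    | succ n =>
      simp only [PySem.Chars.replace.go]
      simp only [List.length_cons] at h
      by_cases hx : x = p
      · rw [if_pos (by simp [hx, List.isPrefixOf])]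
        rw [show ([p] : List Char).length = 1 from rfl]
        simp only [List.drop_succ_cons, List.drop_zero, List.reverse_nil, List.nil_append]
        rw [ih acc n (by omega)]
        simp [hx]
      · rw [if_neg (by simp [List.isPrefixOf]; exact fun hh => hx hh.symm)]
        rw [ih (x :: acc) n (by omega)]
        simp [hx]

theorem count_single (p : Char) (l : List Char) :
    PySem.Chars.count l [p] = l.count p := by
  rw [PySem.Chars.count, if_neg (by simp)]
  simpa using count_go_single p l l.length 0 le_rfl

theorem replace_single (p : Char) (l : List Char) :
    PySem.Chars.replace l [p] [] = l.filter (fun c => c != p) := by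
  rw [PySem.Chars.replace, if_neg (by simp)]
  exact replace_go_single p l [] l.length le_rfl

-- the punctuation count splits into the three individual counts
theorem countP_puncts (l : List Char) :
    (l.countP (fun s => pvPuncts.contains s) : Int)
      = (l.count '.' : Int) + (l.count '!' : Int) + (l.count '?' : Int) := by
  induction l with
  | nil => simp
  | cons x xs ih =>
    by_cases h1 : x = '.' <;> by_cases h2 : x = '!' <;> by_cases h3 : x = '?' <;>
      simp_all [pvPuncts] <;> omega

-- the three single-char filters compose to the membership filter
theorem filter_puncts (l : List Char) :
    ((l.filter (fun c => c != '.')).filter (fun c => c != '!')).filter (fun c => c != '?')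
      = l.filter (fun s => !pvPuncts.contains s) := by
  rw [List.filter_filter, List.filter_filter]
  apply List.filter_congr
  intro c _
  by_cases h1 : c = '.' <;> by_cases h2 : c = '!' <;> by_cases h3 : c = '?' <;>
    simp [pvPuncts, h1, h2, h3]

theorem string_ofList_eq {s : String} {l : List Char} (h : s.toList = l) :
    String.ofList l = s := by
  subst h; simp

-- ===== VERDICT (by name: the statement is the Claim_ definition above) =====
theorem check_puncts_spec : Claim_equal_check_puncts := by
  intro txt _
  unfold Spec_check_puncts check_puncts check_puncts_alt
  rw [check_puncts_loop]
  refine Prod.ext ?_ ?_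
  · rw [countP_puncts]
    simp only [PySem.Str.count_eq]
    rw [show ("." : String).toList = ['.'] from rfl, show ("!" : String).toList = ['!'] from rfl,
        show ("?" : String).toList = ['?'] from rfl]
    rw [count_single, count_single, count_single]
    omega
  · apply string_ofList_eq
    simp only [PySem.Str.toList_replace]
    rw [show ("." : String).toList = ['.'] from rfl, show ("!" : String).toList = ['!'] from rfl,
        show ("?" : String).toList = ['?'] from rfl, show ("" : String).toList = [] from rfl]
    rw [replace_single, replace_single, replace_single, filter_puncts]
    simp
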